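-- pv_equiv track=rewrite | github.com/ViktorSeifert/codewars_python | src/excercises/Count_ones_in_a_segment.py | increment
-- ===== SOURCE A (Python) =====
-- def increment(bin_str):
--     ones = 0
--
--     bin_str = list(bin_str)
--
--     carry = 1
--     for i in range(len(bin_str) - 1, 0, -1):
--         value = bin_str[i]
--
--         if value == "1":
--             ones += 1
--
--         if carry == 1:
--             if value == "1":
--                 carry = 1
--                 value = "0"
--             else:
--                 carry = 0
--                 value = "1"
--
--         bin_str[i] = value
--
--     return "".join(bin_str), ones
-- ===== SOURCE B (Python) =====
-- def increment(bin_str):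
--     suffix = bin_str[1:]
--     ones = suffix.count("1")
--     stripped = suffix.rstrip("1")
--     if stripped == "":
--         new = "0" * len(suffix)
--     else:
--         new = stripped[:-1] + "1" + "0" * (len(suffix) - len(stripped))
--     return bin_str[:1] + new, ones
-- ===== Notes on version B (the rewrite author's own statement) =====
-- stated objective: idiomatic
-- what changed: Replaces A's right-to-left index loop that mutates a char list while threading a carry flag by a slice-based rebuild: count the ones in the suffix, rstrip the trailing run of ones to locate the carry boundary, and concatenate head + flipped boundary char + zeros.
import Mathlib
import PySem

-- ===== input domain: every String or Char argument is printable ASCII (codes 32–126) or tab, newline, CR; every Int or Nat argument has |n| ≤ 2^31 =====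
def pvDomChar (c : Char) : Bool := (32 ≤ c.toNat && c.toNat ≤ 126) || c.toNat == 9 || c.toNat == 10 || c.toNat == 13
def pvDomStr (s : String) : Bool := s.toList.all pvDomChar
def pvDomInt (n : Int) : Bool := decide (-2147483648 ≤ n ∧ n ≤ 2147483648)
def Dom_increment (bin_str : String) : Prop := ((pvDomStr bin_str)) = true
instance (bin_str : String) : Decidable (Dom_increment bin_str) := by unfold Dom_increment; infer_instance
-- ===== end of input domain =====

-- B replaces A's right-to-left carry loop over a mutable char list by a slice-based
-- rebuild (count the ones in the suffix, strip the trailing run of ones to find the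
-- carry boundary, concatenate three pieces); objective: idiomatic, same O(n) cost.

-- ===== PORT A =====
-- one iteration of A's 'for i in range(len(bin_str) - 1, 0, -1)' body; state = (char list, ones, carry)
def incStep (st : List Char × Int × Int) (i : Int) : List Char × Int × Int :=
  let value := PySem.List.pyGetD st.1 i ' '      -- bin_str[i]; i is always in range in A's loop
  let ones := if value = '1' then st.2.1 + 1 else st.2.1
  let cv : Int × Char :=
    if st.2.2 = 1 then (if value = '1' then ((1 : Int), '0') else ((0 : Int), '1'))
    else (st.2.2, value)
  (PySem.List.pySetD st.1 i cv.2, ones, cv.1)    -- bin_str[i] = value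

def increment (bin_str : String) : String × Int :=
  let l := bin_str.toList
  let st := (PySem.List.pyRange ((l.length : Int) - 1) 0 (-1)).foldl incStep (l, 0, 1)
  (String.ofList st.1, st.2.1)                   -- "".join(bin_str), ones

-- ===== PORT B =====
def increment_alt (bin_str : String) : String × Int :=
  let l := bin_str.toList
  let suffix := PySem.List.slice l (some 1) none                 -- bin_str[1:]
  let ones : Int := suffix.count '1'                             -- suffix.count("1")
  let stripped := (suffix.reverse.dropWhile (fun c => c = '1')).reverse
    -- suffix.rstrip("1"): exact, drops the maximal trailing run of '1'
  let newTail :=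
    if stripped = [] then List.replicate suffix.length '0'       -- "0" * len(suffix)
    else stripped.dropLast ++ '1' :: List.replicate (suffix.length - stripped.length) '0'
      -- stripped[:-1] + "1" + "0" * (len(suffix) - len(stripped)); lengths are Nat, difference is nonneg
  (String.ofList (l.take 1 ++ newTail), ones)                    -- bin_str[:1] + new

-- ===== PRECONDITION & SPEC =====
def Spec_increment (bin_str : String) (out : String × Int) : Prop := out = increment_alt bin_str
instance (bin_str : String) (out : String × Int) : Decidable (Spec_increment bin_str out) := by unfold Spec_increment; infer_instance

-- ===== CLAIM (what is proved, stated in full; the proofs are below) =====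
def Claim_equal_increment : Prop := ∀ (bin_str : String), Dom_increment bin_str → Spec_increment bin_str (increment bin_str)

-- ===== LEMMAS AND PROOFS =====

-- right-to-left carry pass over the REVERSED suffix: returns (transformed reversed suffix, ones, final carry)
def goR : List Char → Int → List Char × Int × Int
  | [], ca => ([], 0, ca)
  | c :: r, ca =>
    let o1 : Int := if c = '1' then 1 else 0
    let cv : Int × Char :=
      if ca = 1 then (if c = '1' then ((1 : Int), '0') else ((0 : Int), '1')) else (ca, c)
    let rest := goR r cv.1
    (cv.2 :: rest.1, rest.2.1 + o1, rest.2.2)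

lemma getD_append_length (xs ys : List Char) (c d : Char) :
    (xs ++ c :: ys).getD xs.length d = c := by
  simp [List.getD]

lemma set_append_length {α : Type} (xs ys : List α) (c v : α) :
    (xs ++ c :: ys).set xs.length v = xs ++ v :: ys := by
  induction xs with
  | nil => simp
  | cons x xs ih => simp [ih]

lemma foldA (pre : List Char) (r : List Char) (post : List Char) (o ca : Int) :
    (PySem.List.pyRange ((pre.length : Int) + r.length - 1) ((pre.length : Int) - 1) (-1)).foldl
        incStep (pre ++ r.reverse ++ post, o, ca)
      = (pre ++ (goR r ca).1.reverse ++ post, o + (goR r ca).2.1, (goR r ca).2.2) := by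
  induction r generalizing post o ca with
  | nil =>
    rw [show ((pre.length : Int) + (([] : List Char).length : Int) - 1) = (pre.length : Int) - 1 by
      simp]
    rw [PySem.List.pyRange_neg_one_eq_nil le_rfl]
    simp [goR]
  | cons c r ih =>
    rw [show ((pre.length : Int) + ((c :: r).length : Int) - 1)
          = (pre.length : Int) + (r.length : Int) by push_cast [List.length_cons]; ring]
    rw [PySem.List.pyRange_neg_one_cons (by omega)]
    rw [List.foldl_cons]
    have hidx : ((pre.length : Int) + (r.length : Int)) = (((pre ++ r.reverse).length : Nat) : Int) := by
      simp
    have hstep : incStep (pre ++ (c :: r).reverse ++ post, o, ca) ((pre.length : Int) + (r.length : Int))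
        = (pre ++ r.reverse ++ ((if ca = 1 then (if c = '1' then ((1:Int),'0') else ((0:Int),'1')) else (ca, c)).2 :: post),
           (if c = '1' then o + 1 else o),
           (if ca = 1 then (if c = '1' then ((1:Int),'0') else ((0:Int),'1')) else (ca, c)).1) := by
      simp only [incStep, List.reverse_cons, hidx]
      rw [show pre ++ (r.reverse ++ [c]) ++ post = (pre ++ r.reverse) ++ c :: post by simp]
      simp only [PySem.List.pyGetD_natCast, PySem.List.pySetD_natCast,
        getD_append_length, set_append_length]
    rw [hstep, ih]
    show _ = (pre ++ (goR (c :: r) ca).1.reverse ++ post, o + (goR (c :: r) ca).2.1, (goR (c :: r) ca).2.2)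
    simp only [goR]
    by_cases hca : ca = 1 <;> by_cases hc : c = '1' <;>
      simp [hca, hc, List.append_assoc]
    all_goals omega

lemma goR_count (r : List Char) (ca : Int) : (goR r ca).2.1 = (r.count '1' : Int) := by
  induction r generalizing ca with
  | nil => simp [goR]
  | cons c r ih =>
    by_cases hc : c = '1' <;> simp [goR, hc, ih]

lemma goR_zero (r : List Char) : goR r 0 = (r, (r.count '1' : Int), 0) := by
  induction r with
  | nil => simp [goR]
  | cons c r ih =>
    by_cases hc : c = '1' <;> simp [goR, hc, ih]

lemma goR_one (r : List Char) :
    (goR r 1).1 = (r.takeWhile (fun c => c = '1')).map (fun _ => '0') ++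
      (match r.dropWhile (fun c => c = '1') with | [] => [] | _ :: ds => '1' :: ds) := by
  induction r with
  | nil => simp [goR]
  | cons c r ih =>
    by_cases hc : c = '1'
    · simp [goR, hc, ih]
    · simp [goR, hc, goR_zero]

-- ===== VERDICT (by name: the statement is the Claim_ definition above) =====
theorem increment_spec : Claim_equal_increment := by
  intro s _
  show increment s = increment_alt s
  cases h : s.toList with
  | nil =>
    simp [increment, increment_alt, h, PySem.List.slice_from_one]
  | cons hch suf =>
    have key := foldA [hch] suf.reverse [] 0 1
    rw [show ((([hch] : List Char).length : Int) + ((suf.reverse).length : Int) - 1)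
          = (((hch :: suf).length : Int) - 1) by
        push_cast [List.length_cons, List.length_reverse, List.length_singleton, List.length_nil]; ring] at key
    rw [show ((([hch] : List Char).length : Int) - 1) = (0 : Int) by simp] at key
    simp only [List.reverse_reverse, List.append_nil, List.singleton_append] at key
    simp only [increment, increment_alt, h, PySem.List.slice_from_one, List.tail_cons,
      List.take_succ_cons, List.take_zero, key, goR_count, List.count_reverse]
    refine Prod.ext ?_ (by simp)
    show String.ofList _ = String.ofList _
    congr 1
    rw [goR_one]
    have hsplit := List.takeWhile_append_dropWhile (p := fun c => decide (c = '1')) (l := suf.reverse)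
    cases hd : suf.reverse.dropWhile (fun c => c = '1') with
    | nil =>
      have htk : suf.reverse.takeWhile (fun c => c = '1') = suf.reverse := by
        conv_rhs => rw [← hsplit]
        rw [hd, List.append_nil]
      simp [htk, List.map_const']
    | cons d ds =>
      have hlens : (suf.reverse.takeWhile (fun c => c = '1')).length + (ds.length + 1) = suf.length := by
        have := congrArg List.length hsplit
        simp [hd] at this
        omega
      simp only [List.reverse_cons]
      rw [if_neg (by simp)]
      rw [List.dropLast_concat]
      simp [List.map_const', List.reverse_append, List.reverse_replicate, List.append_assoc,
        List.length_reverse]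
      all_goals rw [show suf.length - (ds.length + 1)
        = (suf.reverse.takeWhile (fun c => decide (c = '1'))).length from by omega]
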